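-- pv_equiv track=rewrite | github.com/MrBrantCode/unitest_baseline | mut_generate/mist_train_cf/cf_73491/solution.py | maxMerge
-- ===== SOURCE A (Python) =====
-- def maxMerge(word1, word2):
--     i = j = 0
--     merge = ""
--
--     while i < len(word1) or j < len(word2):
--         if word1[i:] > word2[j:]:
--             merge += word1[i]
--             i += 1
--         else:
--             merge += word2[j]
--             j += 1
--
--     return merge
-- ===== SOURCE B (Python) =====
-- def maxMerge(word1, word2):
--     out = []
--     while word1 and word2:
--         if word1 > word2:
--             out.append(word1[0])
--             word1 = word1[1:]
--         else:
--             out.append(word2[0])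
--             word2 = word2[1:]
--     return "".join(out) + word1 + word2
-- ===== Notes on version B (the rewrite author's own statement) =====
-- stated objective: simpler
-- what changed: B consumes the two strings themselves (loop only while both are nonempty, one whole-remainder comparison per step) and appends the surviving remainder in one piece, instead of A's index pair looping char-by-char over both slices until both indices reach the end.
import Mathlib
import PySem

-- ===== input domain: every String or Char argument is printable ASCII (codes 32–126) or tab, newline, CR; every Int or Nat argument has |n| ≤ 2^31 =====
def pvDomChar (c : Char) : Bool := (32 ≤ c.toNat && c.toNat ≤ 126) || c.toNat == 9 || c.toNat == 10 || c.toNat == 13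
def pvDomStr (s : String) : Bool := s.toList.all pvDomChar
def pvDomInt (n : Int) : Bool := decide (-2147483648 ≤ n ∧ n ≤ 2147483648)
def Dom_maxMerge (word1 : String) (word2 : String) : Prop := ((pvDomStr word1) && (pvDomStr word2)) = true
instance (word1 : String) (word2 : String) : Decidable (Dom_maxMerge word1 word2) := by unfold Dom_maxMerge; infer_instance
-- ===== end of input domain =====

-- B consumes the two strings themselves, stopping as soon as one empties and
-- appending the remainder in one piece, instead of A's index pair scanning both
-- slices char-by-char to the very end; objective: simpler.


-- ===== PORT A =====
-- Python's `s > t` on str is code-point lexicographic = Lean's `<` on the char lists, reversed (PYSEM.md: str COMPARISON).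
def pyGtChars (a b : List Char) : Bool := decide (b < a)

-- A's while loop: state (i, j, merge); `word1[i:]` = drop i (i ≥ 0 always here, exact);
-- `word1[i]` = getD i (the branch guarantees i is in range, so this equals Python's word1[i]).
def maxMergeLoop (w1 w2 : List Char) (i j : Nat) (merge : List Char) : List Char :=
  if h : i < w1.length ∨ j < w2.length then
    if hc : pyGtChars (w1.drop i) (w2.drop j) then
      maxMergeLoop w1 w2 (i+1) j (merge ++ [w1.getD i ' '])
    else
      maxMergeLoop w1 w2 i (j+1) (merge ++ [w2.getD j ' '])
  else merge
termination_by (w1.length - i) + (w2.length - j)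
decreasing_by
  · have hne : w1.drop i ≠ [] := by
      intro hnil
      simp [pyGtChars, hnil] at hc
    have : i < w1.length := by
      by_contra hle
      exact hne (List.drop_eq_nil_of_le (by omega))
    omega
  · have hj : j < w2.length := by
      by_contra hle
      have h2 : w2.drop j = [] := List.drop_eq_nil_of_le (by omega)
      have hi : i < w1.length := by
        rcases h with h1 | h1
        · exact h1
        · omega
      have hne : w1.drop i ≠ [] := by
        intro hnil
        have := List.drop_eq_nil_iff.mp hnil
        omega
      rcases List.exists_cons_of_ne_nil hne with ⟨x, xs, hx⟩
      simp [pyGtChars, h2, hx] at hc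
    omega

def maxMerge (word1 : String) (word2 : String) : String :=
  String.mk (maxMergeLoop word1.toList word2.toList 0 0 [])

-- ===== PORT B =====
-- B's while loop: runs only while both remainders are nonempty, consuming the
-- head of the greater remainder; then the surviving remainder is appended whole.
def mergeAltLoop : List Char → List Char → List Char → List Char
  | x :: xs, y :: ys, out =>
      if pyGtChars (x :: xs) (y :: ys) then mergeAltLoop xs (y :: ys) (out ++ [x])
      else mergeAltLoop (x :: xs) ys (out ++ [y])
  | xs, ys, out => out ++ xs ++ ys
termination_by xs ys _ => xs.length + ys.length

def maxMerge_alt (word1 : String) (word2 : String) : String :=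
  String.mk (mergeAltLoop word1.toList word2.toList [])

-- ===== PRECONDITION & SPEC =====
def Spec_maxMerge (word1 : String) (word2 : String) (out : String) : Prop := out = maxMerge_alt word1 word2
instance (word1 : String) (word2 : String) (out : String) : Decidable (Spec_maxMerge word1 word2 out) := by unfold Spec_maxMerge; infer_instance

-- ===== CLAIM (what is proved, stated in full; the proofs are below) =====
def Claim_equal_maxMerge : Prop := ∀ (word1 : String) (word2 : String), Dom_maxMerge word1 word2 → Spec_maxMerge word1 word2 (maxMerge word1 word2)

-- ===== LEMMAS AND PROOFS =====

lemma gt_of_drop_nil_right {a : List Char} {i : Nat} (b : List Char)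
    (h : a.drop i ≠ []) : pyGtChars (a.drop i) ([] : List Char) = true := by
  rcases List.exists_cons_of_ne_nil h with ⟨x, xs, hx⟩
  rw [hx]; unfold pyGtChars; exact decide_eq_true (List.nil_lt_cons x xs)

lemma gt_nil_left (ys : List Char) : pyGtChars ([] : List Char) ys = false := by
  unfold pyGtChars; exact decide_eq_false (List.not_lt_nil ys)

-- once word2 is exhausted, A's loop appends the rest of word1 char by char
lemma loopA_right_done : ∀ (k : Nat) (a b : List Char) (i j : Nat) (m : List Char),
    a.length - i ≤ k → b.length ≤ j → maxMergeLoop a b i j m = m ++ a.drop i := by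
  intro k
  induction k with
  | zero =>
    intro a b i j m hk hj
    rw [maxMergeLoop]
    have h1 : ¬ (i < a.length ∨ j < b.length) := by omega
    have hdrop : a.drop i = [] := List.drop_eq_nil_of_le (by omega)
    simp [h1, hdrop]
  | succ k ih =>
    intro a b i j m hk hj
    rw [maxMergeLoop]
    by_cases hi : i < a.length
    · have hb : b.drop j = [] := List.drop_eq_nil_of_le hj
      have hdrop : a.drop i = a[i] :: a.drop (i+1) := List.drop_eq_getElem_cons hi
      have hgt : pyGtChars (a.drop i) (b.drop j) = true := by
        rw [hb]; exact gt_of_drop_nil_right b (by rw [hdrop]; exact List.cons_ne_nil _ _)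
      simp only [hi, true_or, dite_true, hgt]
      rw [ih a b (i+1) j (m ++ [a.getD i ' ']) (by omega) hj]
      rw [List.getD_eq_getElem a ' ' hi, hdrop]
      simp
    · have h1 : ¬ (i < a.length ∨ j < b.length) := by omega
      have hdrop : a.drop i = [] := List.drop_eq_nil_of_le (by omega)
      simp [h1, hdrop]

-- once word1 is exhausted, A's loop appends the rest of word2 char by char
lemma loopA_left_done : ∀ (k : Nat) (a b : List Char) (i j : Nat) (m : List Char),
    b.length - j ≤ k → a.length ≤ i → maxMergeLoop a b i j m = m ++ b.drop j := by
  intro k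
  induction k with
  | zero =>
    intro a b i j m hk hi
    rw [maxMergeLoop]
    have h1 : ¬ (i < a.length ∨ j < b.length) := by omega
    have hdrop : b.drop j = [] := List.drop_eq_nil_of_le (by omega)
    simp [h1, hdrop]
  | succ k ih =>
    intro a b i j m hk hi
    rw [maxMergeLoop]
    by_cases hj : j < b.length
    · have ha : a.drop i = [] := List.drop_eq_nil_of_le hi
      have hgt : pyGtChars (a.drop i) (b.drop j) = false := by
        rw [ha]; exact gt_nil_left _
      have h1 : (i < a.length ∨ j < b.length) := Or.inr hj
      simp only [h1, dite_true, hgt, Bool.false_eq_true]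
      rw [ih a b i (j+1) (m ++ [b.getD j ' ']) (by omega) hi]
      rw [List.getD_eq_getElem b ' ' hj, List.drop_eq_getElem_cons hj]
      simp
    · have h1 : ¬ (i < a.length ∨ j < b.length) := by omega
      have hdrop : b.drop j = [] := List.drop_eq_nil_of_le (by omega)
      simp [h1, hdrop]

lemma loop_agree : ∀ (k : Nat) (a b : List Char) (i j : Nat) (m : List Char),
    (a.length - i) + (b.length - j) ≤ k →
    maxMergeLoop a b i j m = mergeAltLoop (a.drop i) (b.drop j) m := by
  intro k
  induction k with
  | zero =>
    intro a b i j m hk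
    have ha : a.drop i = [] := List.drop_eq_nil_of_le (by omega)
    have hb : b.drop j = [] := List.drop_eq_nil_of_le (by omega)
    have h1 : ¬ (i < a.length ∨ j < b.length) := by omega
    rw [maxMergeLoop, mergeAltLoop.eq_def]
    simp [h1, ha, hb]
  | succ k ih =>
    intro a b i j m hk
    by_cases hi : i < a.length
    · by_cases hj : j < b.length
      · have hda : a.drop i = a[i] :: a.drop (i+1) := List.drop_eq_getElem_cons hi
        have hdb : b.drop j = b[j] :: b.drop (j+1) := List.drop_eq_getElem_cons hj
        rw [maxMergeLoop]
        simp only [hi, true_or, dite_true]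
        rw [hda, hdb, mergeAltLoop]
        rw [List.getD_eq_getElem a ' ' hi, List.getD_eq_getElem b ' ' hj]
        by_cases hc : pyGtChars (a[i] :: a.drop (i+1)) (b[j] :: b.drop (j+1)) = true
        · rw [dif_pos hc, if_pos hc, ← hdb, ih a b (i+1) j (m ++ [a[i]]) (by omega)]
        · rw [dif_neg hc, if_neg hc, ← hda, ih a b i (j+1) (m ++ [b[j]]) (by omega)]
      · -- word2 exhausted: A keeps taking from word1; B appends the remainder whole
        have hb : b.drop j = [] := List.drop_eq_nil_of_le (by omega)
        rw [loopA_right_done (a.length - i) a b i j m (le_refl _) (by omega), hb,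
            mergeAltLoop.eq_def]
        rcases List.exists_cons_of_ne_nil (show a.drop i ≠ [] by
          intro hnil; have := List.drop_eq_nil_iff.mp hnil; omega) with ⟨x, xs, hx⟩
        simp [hx]
    · -- word1 exhausted: A keeps taking from word2; B appends the remainder whole
      have ha : a.drop i = [] := List.drop_eq_nil_of_le (by omega)
      rw [loopA_left_done (b.length - j) a b i j m (le_refl _) (by omega), ha,
          mergeAltLoop.eq_def]
      simp

-- ===== VERDICT (by name: the statement is the Claim_ definition above) =====
theorem maxMerge_spec : Claim_equal_maxMerge := by
  intro word1 word2 _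
  unfold Spec_maxMerge maxMerge maxMerge_alt
  rw [loop_agree (word1.toList.length + word2.toList.length) _ _ 0 0 [] (by omega)]
  simp
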